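-- pv_equiv track=rewrite | github.com/EzraGubbay/CellularAutomaton | SpecialConfigurations.py | create_diagonal_grid
-- ===== SOURCE A (Python) =====
-- def create_diagonal_grid(block, grid_size=64):
--     # Create a grid filled with zeros
--     grid = [[0 for _ in range(grid_size)] for _ in range(grid_size)]
--     block_size = len(block)
--
--     # Place the block along the diagonal
--     for start in range(0, grid_size, block_size):
--         for i in range(block_size):
--             for j in range(block_size):
--                 if start + i < grid_size and start + j < grid_size:
--                     grid[start + i][start + j] = block[i][j]
--     return grid
-- ===== SOURCE B (Python) =====
-- def create_diagonal_grid(block, grid_size=64):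
--     bs = len(block)
--     return [
--         [block[r % bs][c % bs] if r // bs == c // bs else 0 for c in range(grid_size)]
--         for r in range(grid_size)
--     ]
-- ===== Notes on version B (the rewrite author's own statement) =====
-- stated objective: simpler
-- what changed: Replaces zero-filling the grid and then overwriting it with a triple-nested in-place block-placement loop by a single per-cell double comprehension that computes each cell directly from the closed-form diagonal condition r//bs == c//bs.
-- outside the precondition, e.g. on create_diagonal_grid([], 64): A raises ValueError, B raises ZeroDivisionError
import Mathlib
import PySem

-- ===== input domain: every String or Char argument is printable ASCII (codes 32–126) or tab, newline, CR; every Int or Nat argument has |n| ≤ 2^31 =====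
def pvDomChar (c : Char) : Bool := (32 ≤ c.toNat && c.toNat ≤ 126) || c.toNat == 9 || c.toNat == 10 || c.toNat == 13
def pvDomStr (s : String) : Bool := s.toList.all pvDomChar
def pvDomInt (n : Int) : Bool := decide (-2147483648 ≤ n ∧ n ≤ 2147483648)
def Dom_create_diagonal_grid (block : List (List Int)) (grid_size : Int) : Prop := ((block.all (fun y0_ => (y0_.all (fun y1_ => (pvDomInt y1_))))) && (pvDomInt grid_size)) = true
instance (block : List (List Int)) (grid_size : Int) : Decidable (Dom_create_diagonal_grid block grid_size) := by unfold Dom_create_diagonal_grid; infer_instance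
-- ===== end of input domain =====

-- B replaces zero-fill + triple-nested in-place block placement by a per-cell double
-- comprehension using the closed-form diagonal condition r//bs == c//bs (simpler decomposition).


-- ===== PORT A =====
-- literal port of A; pyGetD/pySetD are exact here because inside Pre_ every index used is in range
def create_diagonal_grid (block : List (List Int)) (grid_size : Int) : List (List Int) :=
  let grid := (PySem.List.pyRange 0 grid_size 1).map
    (fun _ => (PySem.List.pyRange 0 grid_size 1).map (fun _ => (0 : Int)))
  let block_size : Int := block.length
  (PySem.List.pyRange 0 grid_size block_size).foldl (fun grid start =>
    (PySem.List.pyRange 0 block_size 1).foldl (fun grid i =>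
      (PySem.List.pyRange 0 block_size 1).foldl (fun grid j =>
        if start + i < grid_size ∧ start + j < grid_size then
          PySem.List.pySetD grid (start + i)
            (PySem.List.pySetD (PySem.List.pyGetD grid (start + i) []) (start + j)
              (PySem.List.pyGetD (PySem.List.pyGetD block i []) j 0))
        else grid) grid) grid) grid

-- ===== PORT B =====
-- literal port of Source B; pyGetD is exact here because inside Pre_ every index used is in range
def create_diagonal_grid_alt (block : List (List Int)) (grid_size : Int) : List (List Int) :=
  let bs : Int := block.length
  (PySem.List.pyRange 0 grid_size 1).map (fun r =>
    (PySem.List.pyRange 0 grid_size 1).map (fun c =>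
      if PySem.Int.floordiv r bs = PySem.Int.floordiv c bs then
        PySem.List.pyGetD (PySem.List.pyGetD block (PySem.Int.mod r bs) []) (PySem.Int.mod c bs) 0
      else 0))

-- ===== PRECONDITION & SPEC =====
-- Pre_ excludes exactly the inputs where Python A raises: block = [] (range step 0, ValueError),
-- and ragged blocks whose first min(len(block), grid_size) rows are shorter than that bound (IndexError).
def Pre_create_diagonal_grid (block : List (List Int)) (grid_size : Int) : Prop :=
  block ≠ [] ∧
    ∀ row ∈ block.take (min block.length grid_size.toNat),
      min block.length grid_size.toNat ≤ row.length
instance (block : List (List Int)) (grid_size : Int) : Decidable (Pre_create_diagonal_grid block grid_size) := by unfold Pre_create_diagonal_grid; infer_instance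
def pvWitness_create_diagonal_grid : List (List Int) × Int := ([[1, 2], [3, 4]], 5)

def Spec_create_diagonal_grid (block : List (List Int)) (grid_size : Int) (out : List (List Int)) : Prop := out = create_diagonal_grid_alt block grid_size
instance (block : List (List Int)) (grid_size : Int) (out : List (List Int)) : Decidable (Spec_create_diagonal_grid block grid_size out) := by unfold Spec_create_diagonal_grid; infer_instance

-- ===== CLAIM (what is proved, stated in full; the proofs are below) =====
def Claim_equal_create_diagonal_grid : Prop := ∀ (block : List (List Int)) (grid_size : Int), Dom_create_diagonal_grid block grid_size → Pre_create_diagonal_grid block grid_size → Spec_create_diagonal_grid block grid_size (create_diagonal_grid block grid_size)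

-- ===== LEMMAS AND PROOFS =====

-- value of block[i][j] as both ports read it (getD with defaults; exact in range)
def bval (block : List (List Int)) (i j : Nat) : Int := (block.getD i []).getD j 0

-- an n×n grid described by a cell function
def gridOf (n : Nat) (g : Nat → Nat → Int) : List (List Int) :=
  (List.range n).map (fun r => (List.range n).map (g r))

-- Nat-level versions of A's three nested loop bodies
def stepJ (block : List (List Int)) (n start i : Nat) (G : List (List Int)) (j : Nat) : List (List Int) :=
  if start + i < n ∧ start + j < n then
    PySem.List.pySetD G ((start + i : Nat) : Int)
      (PySem.List.pySetD (PySem.List.pyGetD G ((start + i : Nat) : Int) []) ((start + j : Nat) : Int)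
        (bval block i j))
  else G

def stepI (block : List (List Int)) (n start : Nat) (G : List (List Int)) (i : Nat) : List (List Int) :=
  (List.range block.length).foldl (stepJ block n start i) G

def stepS (block : List (List Int)) (n : Nat) (G : List (List Int)) (k : Nat) : List (List Int) :=
  (List.range block.length).foldl (stepI block n (block.length * k)) G

theorem gridOf_congr {n : Nat} {g g' : Nat → Nat → Int}
    (h : ∀ r < n, ∀ c < n, g r c = g' r c) : gridOf n g = gridOf n g' := by
  unfold gridOf
  refine List.map_congr_left (fun r hr => List.map_congr_left (fun c hc => ?_))
  exact h r (List.mem_range.mp hr) c (List.mem_range.mp hc)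

theorem set_map_range {α : Type} (f : Nat → α) {n k : Nat} (v : α) (_hk : k < n) :
    ((List.range n).map f).set k v = (List.range n).map (fun m => if m = k then v else f m) := by
  apply List.ext_getElem
  · simp
  · intro i h1 h2
    simp only [List.getElem_set, List.getElem_map, List.getElem_range] at *
    rcases eq_or_ne i k with h | h
    · simp [h]
    · simp [h, Ne.symm h]

theorem getD_map_range' {α : Type} (f : Nat → α) {n k : Nat} (d : α) (hk : k < n) :
    ((List.range n).map f).getD k d = f k := by
  rw [List.getD_eq_getElem?_getD]
  simp [hk]

theorem setCell {n : Nat} (g : Nat → Nat → Int) {a b : Nat} (v : Int) (ha : a < n) (hb : b < n) :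
    PySem.List.pySetD (gridOf n g) ((a : Nat) : Int)
      (PySem.List.pySetD (PySem.List.pyGetD (gridOf n g) ((a : Nat) : Int) []) ((b : Nat) : Int) v)
    = gridOf n (fun r c => if r = a ∧ c = b then v else g r c) := by
  simp only [PySem.List.pySetD_natCast, PySem.List.pyGetD_natCast]
  unfold gridOf
  rw [getD_map_range' _ _ ha, set_map_range _ v hb, set_map_range _ _ ha]
  refine List.map_congr_left (fun r hr => ?_)
  rcases eq_or_ne r a with h | h
  · subst h
    simp only [if_pos rfl]
    refine List.map_congr_left (fun c hc => ?_)
    rcases eq_or_ne c b with h2 | h2 <;> simp [h2]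
  · simp [h]

-- inner j-loop: row a := start+i gets cells [start, start+t) ∩ [0, n) set to block[i][·-start]
theorem rowFold (block : List (List Int)) (n start i : Nat) (g : Nat → Nat → Int) (t : Nat) :
    (List.range t).foldl (stepJ block n start i) (gridOf n g)
    = gridOf n (fun r c =>
        if r = start + i ∧ start + i < n ∧ start ≤ c ∧ c < start + t ∧ c < n
        then bval block i (c - start) else g r c) := by
  induction t with
  | zero =>
    simp only [List.range_zero, List.foldl_nil]
    refine gridOf_congr (fun r hr c hc => ?_)
    exact (if_neg (by omega)).symm
  | succ t ih =>
    rw [List.range_succ, List.foldl_append, ih]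
    simp only [List.foldl_cons, List.foldl_nil]
    unfold stepJ
    split_ifs with h
    · rw [setCell _ _ h.1 h.2]
      refine gridOf_congr (fun r hr c hc => ?_)
      split_ifs <;> first | rfl | omega | (congr 1; omega)
    · refine gridOf_congr (fun r hr c hc => ?_)
      split_ifs <;> first | rfl | omega | (congr 1; omega)

-- middle i-loop over s rows
theorem blockFold (block : List (List Int)) (n start : Nat) (g : Nat → Nat → Int) (s : Nat) :
    (List.range s).foldl (stepI block n start) (gridOf n g)
    = gridOf n (fun r c =>
        if start ≤ r ∧ r < start + s ∧ r < n ∧ start ≤ c ∧ c < start + block.length ∧ c < n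
        then bval block (r - start) (c - start) else g r c) := by
  induction s with
  | zero =>
    simp only [List.range_zero, List.foldl_nil]
    refine gridOf_congr (fun r hr c hc => ?_)
    exact (if_neg (by omega)).symm
  | succ s ih =>
    rw [List.range_succ, List.foldl_append, ih]
    simp only [List.foldl_cons, List.foldl_nil]
    unfold stepI
    rw [rowFold]
    refine gridOf_congr (fun r hr c hc => ?_)
    split_ifs <;> first | rfl | omega | (congr 2 <;> omega)

theorem div_eq_iff_interval {bs m r : Nat} (hbs : 0 < bs) :
    r / bs = m ↔ bs * m ≤ r ∧ r < bs * m + bs := by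
  constructor
  · intro h
    subst h
    have h1 := Nat.div_add_mod r bs
    have h2 := Nat.mod_lt r hbs
    constructor <;> [exact Nat.le.intro h1; omega]
  · rintro ⟨h1, h2⟩
    have h3 := Nat.div_add_mod r bs
    have h4 := Nat.mod_lt r hbs
    have e1 : bs * (m + 1) = bs * m + bs := by ring
    have e2 : bs * (r / bs + 1) = bs * (r / bs) + bs := by ring
    have h5 : r / bs < m + 1 := by
      have : bs * (r / bs) < bs * (m + 1) := by omega
      exact Nat.lt_of_mul_lt_mul_left this
    have h6 : m < r / bs + 1 := by
      have : bs * m < bs * (r / bs + 1) := by omega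
      exact Nat.lt_of_mul_lt_mul_left this
    omega

theorem sub_eq_mod_of_div_eq {bs m r : Nat} (h : r / bs = m) : r - bs * m = r % bs := by
  subst h
  have := Nat.div_add_mod r bs
  omega

-- outer loop over the first m block starts
theorem startsFold (block : List (List Int)) (n : Nat) (hbs : 0 < block.length) (m : Nat) :
    (List.range m).foldl (stepS block n) (gridOf n (fun _ _ => 0))
    = gridOf n (fun r c =>
        if r / block.length = c / block.length ∧ r / block.length < m ∧ r < n ∧ c < n
        then bval block (r % block.length) (c % block.length) else 0) := by
  induction m with
  | zero =>
    simp only [List.range_zero, List.foldl_nil]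
    refine gridOf_congr (fun r hr c hc => ?_)
    exact (if_neg (by rintro ⟨-, h, -⟩; exact Nat.not_lt_zero _ h)).symm
  | succ m ih =>
    rw [List.range_succ, List.foldl_append, ih]
    simp only [List.foldl_cons, List.foldl_nil]
    unfold stepS
    rw [blockFold]
    refine gridOf_congr (fun r hr c hc => ?_)
    by_cases hrm : r / block.length = m
    · by_cases hcm : c / block.length = m
      · have ir := (div_eq_iff_interval hbs).mp hrm
        have ic := (div_eq_iff_interval hbs).mp hcm
        rw [if_pos ⟨ir.1, ir.2, hr, ic.1, ic.2, hc⟩,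
          if_pos ⟨hrm.trans hcm.symm, by omega, hr, hc⟩,
          sub_eq_mod_of_div_eq hrm, sub_eq_mod_of_div_eq hcm]
      · have ic' : ¬(block.length * m ≤ c ∧ c < block.length * m + block.length) :=
          fun hic => hcm ((div_eq_iff_interval hbs).mpr hic)
        rw [if_neg (fun h => ic' ⟨h.2.2.2.1, h.2.2.2.2.1⟩),
          if_neg (by rintro ⟨he, hlt, -⟩; omega),
          if_neg (by rintro ⟨he, -⟩; omega)]
    · have ir' : ¬(block.length * m ≤ r ∧ r < block.length * m + block.length) :=
        fun hir => hrm ((div_eq_iff_interval hbs).mpr hir)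
      rw [if_neg (fun h => ir' ⟨h.1, h.2.1⟩)]
      have hiff : (r / block.length = c / block.length ∧ r / block.length < m ∧ r < n ∧ c < n)
          ↔ (r / block.length = c / block.length ∧ r / block.length < m + 1 ∧ r < n ∧ c < n) := by
        omega
      rw [if_congr hiff rfl rfl]

theorem div_lt_ceil {bs n r : Nat} (hbs : 0 < bs) (hr : r < n) :
    r / bs < (n + bs - 1) / bs := by
  have h1 : r / bs + 1 ≤ (n + bs - 1) / bs := by
    rw [Nat.le_div_iff_mul_le hbs]
    have h2 := Nat.div_mul_le_self r bs
    have e1 : (r / bs + 1) * bs = r / bs * bs + bs := by ring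
    omega
  omega

theorem portA_eq (block : List (List Int)) (n : Nat) (hn : 0 < n) (hbs : 0 < block.length) :
    create_diagonal_grid block (n : Int)
    = (List.range ((n + block.length - 1) / block.length)).foldl (stepS block n)
        (gridOf n (fun _ _ => 0)) := by
  unfold create_diagonal_grid
  dsimp only
  have hbsInt : (0 : Int) < (block.length : Int) := by exact_mod_cast hbs
  rw [PySem.List.pyRange_of_pos 0 (n : Int) hbsInt,
    if_pos (show (0 : Int) < (n : Int) by exact_mod_cast hn)]
  have hm : (((n : Int) - 0 + (block.length : Int) - 1) / (block.length : Int)).toNat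
      = (n + block.length - 1) / block.length := by
    have e : ((n : Int) - 0 + (block.length : Int) - 1) = ((n + block.length - 1 : Nat) : Int) := by
      push_cast
      omega
    rw [e, ← Int.natCast_div, Int.toNat_natCast]
  rw [hm, PySem.List.pyRange_zero_natCast n, List.foldl_map]
  have hg : ∀ (X : List Int), X.length = n →
      X.map (fun _ => X.map (fun _ => (0 : Int))) = gridOf n (fun _ _ => 0) := by
    intro X hX
    simp [List.map_const', hX, gridOf]
  rw [hg _ (by simp)]
  refine PySem.List.foldl_congr_mem _ _ _ _ (fun G k _ => ?_)
  unfold stepS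
  rw [PySem.List.pyRange_zero_natCast block.length, List.foldl_map]
  refine PySem.List.foldl_congr_mem _ _ _ _ (fun G' i _ => ?_)
  unfold stepI
  rw [List.foldl_map]
  refine PySem.List.foldl_congr_mem _ _ _ _ (fun G'' j _ => ?_)
  have er : (0 + ((block.length : Int)) * (k : Int) + (i : Int))
      = ((block.length * k + i : Nat) : Int) := by push_cast; ring
  have ec : (0 + ((block.length : Int)) * (k : Int) + (j : Int))
      = ((block.length * k + j : Nat) : Int) := by push_cast; ring
  rw [er, ec]
  unfold stepJ bval
  have hcond : (((block.length * k + i : Nat) : Int) < (n : Int)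
      ∧ ((block.length * k + j : Nat) : Int) < (n : Int))
      ↔ (block.length * k + i < n ∧ block.length * k + j < n) := by
    constructor <;> intro h <;> exact_mod_cast h
  simp only [PySem.List.pySetD_natCast, PySem.List.pyGetD_natCast]
  exact if_congr hcond rfl rfl

theorem portB_eq (block : List (List Int)) (n : Nat) (hbs : 0 < block.length) :
    create_diagonal_grid_alt block (n : Int)
    = gridOf n (fun r c =>
        if r / block.length = c / block.length
        then bval block (r % block.length) (c % block.length) else 0) := by
  unfold create_diagonal_grid_alt gridOf bval
  dsimp only
  rw [PySem.List.pyRange_zero_natCast n]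
  simp only [List.map_map, Function.comp_def, PySem.Int.floordiv_natCast,
    PySem.Int.mod_natCast, PySem.List.pyGetD_natCast, Nat.cast_inj]

-- ===== VERDICT (by name: the statement is the Claim_ definition above) =====
theorem create_diagonal_grid_spec : Claim_equal_create_diagonal_grid := by
  unfold Claim_equal_create_diagonal_grid
  intro block gs _ hpre
  unfold Spec_create_diagonal_grid
  obtain ⟨hne, -⟩ := hpre
  have hbs : 0 < block.length := List.length_pos_iff.mpr hne
  by_cases hgs : gs ≤ 0
  · unfold create_diagonal_grid create_diagonal_grid_alt
    dsimp only
    have hbsInt : (0 : Int) < (block.length : Int) := by exact_mod_cast hbs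
    rw [PySem.List.pyRange_of_pos 0 gs hbsInt, if_neg (by omega),
      PySem.List.pyRange_one_eq_nil hgs]
    simp
  · have hgs2 : 0 < gs := by omega
    clear hgs
    have hn0 : 0 < gs.toNat := by omega
    have hgseq : gs = (gs.toNat : Int) := by omega
    rw [hgseq, portA_eq block gs.toNat hn0 hbs, portB_eq block gs.toNat hbs,
      startsFold block gs.toNat hbs]
    apply gridOf_congr
    intro r hr c hc
    have := div_lt_ceil hbs hr
    simp only [hr, hc, and_true]
    by_cases h : r / block.length = c / block.length
    · simp [h, h ▸ this]
    · simp [h]
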